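-- pv_equiv track=rewrite | github.com/twosigma/tensu | app/display.py | break_lines_on_max_width
-- ===== SOURCE A (Python) =====
-- def break_lines_on_max_width(text: str, max_w: int) -> str:
--     """Formats a string so no line of text is longer than max_width
--     by adding newlines instead of truncating."""
--
--     new = []
--     lines = text.split("\n")
--     for line in lines:
--         if len(line) < max_w:
--             new.append(line)
--         else:
--             s = 0
--             while line[s : max_w + s] != "":
--                 new.append(line[s : max_w + s])
--                 s += max_w
--
--     return "\n".join(new)
-- ===== SOURCE B (Python) =====
-- def break_lines_on_max_width(text: str, max_w: int) -> str:
--     """Single pass: scan characters with a running column counter, inserting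
--     a newline whenever the column reaches max_w; original newlines reset it."""
--     out = []
--     col = 0
--     for ch in text:
--         if ch == "\n":
--             out.append(ch)
--             col = 0
--         else:
--             if col == max_w:
--                 out.append("\n")
--                 col = 0
--             out.append(ch)
--             col += 1
--     return "".join(out)
-- ===== Notes on version B (the rewrite author's own statement) =====
-- stated objective: alternative
-- what changed: B replaces A's split-into-lines plus per-line slicing loop by a single character scan with a running column counter that inserts a newline whenever the column reaches max_w and resets on original newlines.
-- outside the precondition, e.g. on break_lines_on_max_width('abc', 0): A returns '', B returns '\nabc'; on break_lines_on_max_width('abc', -1): A returns 'ab', B returns 'abc'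
import Mathlib
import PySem

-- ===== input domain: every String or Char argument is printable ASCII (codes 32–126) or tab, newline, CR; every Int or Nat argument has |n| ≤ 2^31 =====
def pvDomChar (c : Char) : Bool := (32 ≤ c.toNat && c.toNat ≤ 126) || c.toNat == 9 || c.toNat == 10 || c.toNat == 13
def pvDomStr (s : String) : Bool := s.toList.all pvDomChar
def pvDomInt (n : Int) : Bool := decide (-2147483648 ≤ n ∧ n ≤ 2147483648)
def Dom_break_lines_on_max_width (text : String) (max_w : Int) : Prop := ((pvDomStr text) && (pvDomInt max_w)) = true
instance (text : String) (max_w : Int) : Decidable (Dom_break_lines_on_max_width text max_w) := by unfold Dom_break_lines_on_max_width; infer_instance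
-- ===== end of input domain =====

-- B re-decomposes A's line-splitting + per-line slicing as one character scan with a
-- running column counter (return value only; neither program mutates its arguments).

-- ===== PORT A =====
-- A's inner while loop: append slices line[s : max_w + s] until the slice is empty.
-- The fuel argument is only a totality guard; line.length + 1 iterations always suffice
-- when max_w ≥ 1 (inside Pre_), and the loop stops on the empty slice exactly as Python does.
def pvALoop (line : List Char) (max_w : Int) : Nat → List (List Char) → Int → List (List Char)
  | 0, acc, _ => acc
  | fuel + 1, acc, s =>
    if PySem.List.slice line (some s) (some (max_w + s)) = [] then acc
    else pvALoop line max_w fuel (acc ++ [PySem.List.slice line (some s) (some (max_w + s))]) (s + max_w)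

def break_lines_on_max_width (text : String) (max_w : Int) : String :=
  let lines := PySem.Chars.splitOn text.toList ['\n']
  let new := lines.foldl (fun acc line =>
    if ((line.length : Int) < max_w) then acc ++ [line]
    else pvALoop line max_w (line.length + 1) acc 0) []
  String.ofList (PySem.Chars.join ['\n'] new)

-- ===== PORT B =====
def break_lines_on_max_width_alt (text : String) (max_w : Int) : String :=
  let st := text.toList.foldl (fun (p : List Char × Int) ch =>
    if ch = '\n' then (p.1 ++ [ch], 0)
    else if p.2 = max_w then (p.1 ++ ['\n', ch], 1)
    else (p.1 ++ [ch], p.2 + 1)) ([], 0)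
  String.ofList st.1

-- ===== PRECONDITION & SPEC =====
-- Pre_ restricts to the natural domain of a wrapping width, max_w ≥ 1: for non-positive
-- widths no wrapping behaviour is specified (A drops lines or keeps truncated prefixes,
-- B leaves the text unwrapped; see the cited examples), so those inputs are excluded.
def Pre_break_lines_on_max_width (text : String) (max_w : Int) : Prop := 1 ≤ max_w
instance (text : String) (max_w : Int) : Decidable (Pre_break_lines_on_max_width text max_w) := by unfold Pre_break_lines_on_max_width; infer_instance

def pvWitness_break_lines_on_max_width : String × Int := ("ab\ncdef", 3)

def Spec_break_lines_on_max_width (text : String) (max_w : Int) (out : String) : Prop := out = break_lines_on_max_width_alt text max_w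
instance (text : String) (max_w : Int) (out : String) : Decidable (Spec_break_lines_on_max_width text max_w out) := by unfold Spec_break_lines_on_max_width; infer_instance

-- ===== CLAIM (what is proved, stated in full; the proofs are below) =====
def Claim_equal_break_lines_on_max_width : Prop := ∀ (text : String) (max_w : Int), Dom_break_lines_on_max_width text max_w → Pre_break_lines_on_max_width text max_w → Spec_break_lines_on_max_width text max_w (break_lines_on_max_width text max_w)

-- ===== LEMMAS AND PROOFS =====

-- proof-side recursive view of B's fold (chars processed front to back, column carried along)
def pvBRec (max_w : Int) : List Char → Int → List Char
  | [], _ => []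
  | c :: cs, col =>
    if c = '\n' then '\n' :: pvBRec max_w cs 0
    else if col = max_w then '\n' :: c :: pvBRec max_w cs 1
    else c :: pvBRec max_w cs (col + 1)

-- B's behaviour on a single newline-free line
def pvLineRec (max_w : Int) : List Char → Int → List Char
  | [], _ => []
  | c :: cs, col =>
    if col = max_w then '\n' :: c :: pvLineRec max_w cs 1
    else c :: pvLineRec max_w cs (col + 1)

-- splitting on '\n' with an accumulated current piece (what Chars.splitOn computes)
def pvSplitNl : List Char → List Char → List (List Char)
  | pre, [] => [pre]
  | pre, c :: rest => if c = '\n' then pre :: pvSplitNl [] rest else pvSplitNl (pre ++ [c]) rest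

-- successive w-sized chunks of a line (what A's slice loop produces)
def pvChunks (w : Nat) : List Char → List (List Char)
  | [] => []
  | c :: cs => (c :: cs).take w :: pvChunks w (cs.drop (w - 1))
  termination_by l => l.length
  decreasing_by simp

-- A's per-line contribution
def pvPerLine (max_w : Int) (line : List Char) : List (List Char) :=
  if ((line.length : Int) < max_w) then [line] else pvChunks max_w.toNat line

theorem pv_go_eq : ∀ (fuel : Nat) (l cur : List Char) (acc : List (List Char)),
    l.length < fuel →
    PySem.Chars.splitOn.go ['\n'] fuel l cur acc = acc.reverse ++ pvSplitNl cur.reverse l := by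
  intro fuel
  induction fuel with
  | zero => intro l cur acc h; omega
  | succ fuel ih =>
    intro l cur acc h
    cases l with
    | nil => simp [PySem.Chars.splitOn.go, pvSplitNl]
    | cons c rest =>
      simp only [PySem.Chars.splitOn.go, List.isPrefixOf, pvSplitNl]
      by_cases hc : c = '\n'
      · subst hc
        simp only [BEq.rfl, Bool.true_and, if_pos]
        rw [ih _ _ _ (by simp at h ⊢; omega)]
        simp
      · rw [if_neg (by simp [Ne.symm hc]), if_neg hc, ih _ _ _ (by simp at h ⊢; omega)]
        simp

theorem pv_splitOn_eq (cs : List Char) : PySem.Chars.splitOn cs ['\n'] = pvSplitNl [] cs := by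
  unfold PySem.Chars.splitOn
  rw [pv_go_eq _ _ _ _ (by omega)]
  simp

theorem pv_splitNl_ne_nil : ∀ (l pre : List Char), pvSplitNl pre l ≠ [] := by
  intro l
  induction l with
  | nil => intro pre; simp [pvSplitNl]
  | cons c rest ih =>
    intro pre
    simp only [pvSplitNl]
    split_ifs <;> simp [ih]

theorem pv_splitNl_no_nl : ∀ (l pre : List Char), '\n' ∉ l → pvSplitNl pre l = [pre ++ l] := by
  intro l
  induction l with
  | nil => intro pre _; simp [pvSplitNl]
  | cons c rest ih =>
    intro pre h
    simp only [List.mem_cons, not_or] at h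
    simp only [pvSplitNl, if_neg (Ne.symm h.1)]
    rw [ih _ h.2]
    simp

theorem pv_splitNl_append : ∀ (xs pre rest : List Char), '\n' ∉ xs →
    pvSplitNl pre (xs ++ '\n' :: rest) = (pre ++ xs) :: pvSplitNl [] rest := by
  intro xs
  induction xs with
  | nil => intro pre rest _; simp [pvSplitNl]
  | cons c xs ih =>
    intro pre rest h
    simp only [List.mem_cons, not_or] at h
    simp only [List.cons_append, pvSplitNl, if_neg (Ne.symm h.1)]
    rw [ih _ _ h.2]
    simp

theorem pv_chunks_cons_eq (w : Nat) (hw : 1 ≤ w) (xs : List Char) (hxs : xs ≠ []) :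
    pvChunks w xs = xs.take w :: pvChunks w (xs.drop w) := by
  cases xs with
  | nil => exact absurd rfl hxs
  | cons c cs =>
    rw [pvChunks]
    congr 1
    congr 1
    obtain ⟨w', rfl⟩ : ∃ w', w = w' + 1 := ⟨w - 1, by omega⟩
    simp

theorem pv_chunks_short (w : Nat) (xs : List Char) (hxs : xs ≠ []) (h : xs.length ≤ w) :
    pvChunks w xs = [xs] := by
  cases xs with
  | nil => exact absurd rfl hxs
  | cons c cs =>
    rw [pvChunks]
    have h1 : cs.drop (w - 1) = [] := by
      apply List.drop_eq_nil_of_le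
      simp at h ⊢
      omega
    rw [h1]
    simp [pvChunks]
    simp at h ⊢; omega

theorem pv_aLoop_eq (line : List Char) (max_w : Int) (hw : 1 ≤ max_w) :
    ∀ (fuel n : Nat) (acc : List (List Char)), line.length - n < fuel →
    pvALoop line max_w fuel acc (n : Int) = acc ++ pvChunks max_w.toNat (line.drop n) := by
  intro fuel
  induction fuel with
  | zero => intro n acc h; omega
  | succ fuel ih =>
    intro n acc h
    have hcast : max_w + (n : Int) = ((n + max_w.toNat : Nat) : Int) := by
      push_cast; omega
    rw [pvALoop, hcast]
    rw [show ((n:Int) = ((n:Nat):Int)) from rfl]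
    rw [PySem.List.slice_natCast]
    have htk : n + max_w.toNat - n = max_w.toNat := by omega
    rw [htk]
    by_cases hnil : (line.drop n).take max_w.toNat = []
    · rw [if_pos hnil]
      have : line.drop n = [] := by
        rcases List.eq_nil_or_concat (line.drop n) with h' | ⟨ys, y, h'⟩
        · exact h'
        · exfalso
          rw [h'] at hnil
          have := congrArg List.length hnil
          simp at this
          omega
      rw [this, pvChunks]
      simp
    · rw [if_neg hnil]
      have hdn : line.drop n ≠ [] := by intro h'; rw [h'] at hnil; simp at hnil
      have hlen : n < line.length := by
        by_contra h'
        exact hdn (List.drop_eq_nil_of_le (by omega))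
      have hcast2 : (n : Int) + max_w = ((n + max_w.toNat : Nat) : Int) := by push_cast; omega
      rw [hcast2, ih (n + max_w.toNat) _ (by omega)]
      rw [pv_chunks_cons_eq max_w.toNat (by omega) _ hdn]
      rw [List.drop_drop]
      simp

theorem pv_foldA_eq (max_w : Int) (hw : 1 ≤ max_w) :
    ∀ (lines : List (List Char)) (acc : List (List Char)),
    lines.foldl (fun acc line =>
      if ((line.length : Int) < max_w) then acc ++ [line]
      else pvALoop line max_w (line.length + 1) acc 0) acc
    = acc ++ lines.flatMap (pvPerLine max_w) := by
  intro lines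
  induction lines with
  | nil => intro acc; simp
  | cons line rest ih =>
    intro acc
    simp only [List.foldl_cons, List.flatMap_cons]
    by_cases hlt : ((line.length : Int) < max_w)
    · rw [if_pos hlt, ih]
      simp [pvPerLine, if_pos hlt]
    · rw [if_neg hlt]
      have h0 := pv_aLoop_eq line max_w hw (line.length + 1) 0 acc (by omega)
      rw [show (((0 : Nat)) : Int) = (0 : Int) from rfl] at h0
      rw [h0, ih]
      simp [pvPerLine, if_neg hlt]

theorem pv_bFold_eq (max_w : Int) : ∀ (cs : List Char) (out : List Char) (col : Int),
    (cs.foldl (fun (p : List Char × Int) ch =>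
      if ch = '\n' then (p.1 ++ [ch], 0)
      else if p.2 = max_w then (p.1 ++ ['\n', ch], 1)
      else (p.1 ++ [ch], p.2 + 1)) (out, col)).1 = out ++ pvBRec max_w cs col := by
  intro cs
  induction cs with
  | nil => intro out col; simp [pvBRec]
  | cons c cs ih =>
    intro out col
    simp only [List.foldl_cons, pvBRec]
    by_cases hc : c = '\n'
    · rw [if_pos hc, if_pos hc, ih]; simp [hc]
    · rw [if_neg hc, if_neg hc]
      by_cases hcol : col = max_w
      · rw [if_pos hcol, if_pos hcol, ih]; simp
      · rw [if_neg hcol, if_neg hcol, ih]; simp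

theorem pv_bRec_no_nl (max_w : Int) : ∀ (cs : List Char) (col : Int), '\n' ∉ cs →
    pvBRec max_w cs col = pvLineRec max_w cs col := by
  intro cs
  induction cs with
  | nil => intro col _; rfl
  | cons c cs ih =>
    intro col h
    simp only [List.mem_cons, not_or] at h
    simp only [pvBRec, pvLineRec, if_neg (Ne.symm h.1)]
    by_cases hcol : col = max_w
    · rw [if_pos hcol, if_pos hcol, ih _ h.2]
    · rw [if_neg hcol, if_neg hcol, ih _ h.2]

theorem pv_bRec_append_nl (max_w : Int) : ∀ (xs rest : List Char) (col : Int), '\n' ∉ xs →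
    pvBRec max_w (xs ++ '\n' :: rest) col = pvLineRec max_w xs col ++ '\n' :: pvBRec max_w rest 0 := by
  intro xs
  induction xs with
  | nil => intro rest col _; simp [pvBRec, pvLineRec]
  | cons c xs ih =>
    intro rest col h
    simp only [List.mem_cons, not_or] at h
    simp only [List.cons_append, pvBRec, pvLineRec, if_neg (Ne.symm h.1)]
    by_cases hcol : col = max_w
    · rw [if_pos hcol, if_pos hcol, ih _ _ h.2]; simp
    · rw [if_neg hcol, if_neg hcol, ih _ _ h.2]; simp

theorem pv_lineRec_at_max (max_w : Int) (hw : 1 ≤ max_w) (cs : List Char) :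
    pvLineRec max_w cs max_w = if cs = [] then [] else '\n' :: pvLineRec max_w cs 0 := by
  cases cs with
  | nil => rfl
  | cons c cs =>
    simp only [pvLineRec, List.cons_ne_nil, if_neg (by omega : ¬ (0 : Int) = max_w)]
    simp

theorem pv_lineRec_step (max_w : Int) (hw : 1 ≤ max_w) :
    ∀ (line : List Char) (r : Nat) (col : Int), col = max_w - (r : Int) → 0 < r → (r : Int) ≤ max_w →
    pvLineRec max_w line col =
      line.take r ++ (if line.drop r = [] then [] else '\n' :: pvLineRec max_w (line.drop r) 0) := by
  intro line
  induction line with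
  | nil => intro r col _ _ _; simp [pvLineRec]
  | cons c cs ih =>
    intro r col hcol hr hrw
    have hne : ¬ col = max_w := by omega
    simp only [pvLineRec, if_neg hne]
    by_cases hr1 : r = 1
    · subst hr1
      have h1 : col + 1 = max_w := by omega
      rw [h1, pv_lineRec_at_max max_w hw cs]
      simp
    · have ihh := ih (r - 1) (col + 1) (by omega) (by omega) (by omega)
      rw [ihh]
      have htake : (c :: cs).take r = c :: cs.take (r - 1) := by
        obtain ⟨r', rfl⟩ : ∃ r', r = r' + 1 := ⟨r - 1, by omega⟩
        simp
      have hdrop : (c :: cs).drop r = cs.drop (r - 1) := by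
        obtain ⟨r', rfl⟩ : ∃ r', r = r' + 1 := ⟨r - 1, by omega⟩
        simp
      rw [htake, hdrop]
      simp

theorem pv_join_append (s : List Char) : ∀ (a b : List (List Char)), a ≠ [] → b ≠ [] →
    PySem.Chars.join s (a ++ b) = PySem.Chars.join s a ++ s ++ PySem.Chars.join s b := by
  intro a
  induction a with
  | nil => intro b h _; exact absurd rfl h
  | cons x a ih =>
    intro b _ hb
    cases a with
    | nil =>
      cases b with
      | nil => exact absurd rfl hb
      | cons y bs =>
        simp only [List.singleton_append, PySem.Chars.join_cons_cons, PySem.Chars.join_singleton]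
    | cons z as =>
      rw [show (x :: z :: as) ++ b = x :: ((z :: as) ++ b) from rfl]
      rw [show (z :: as) ++ b = z :: (as ++ b) from rfl, PySem.Chars.join_cons_cons,
        show z :: (as ++ b) = (z :: as) ++ b from rfl]
      rw [ih b (by simp) hb, PySem.Chars.join_cons_cons]
      simp [List.append_assoc]

theorem pv_lineRec_join (max_w : Int) (hw : 1 ≤ max_w) : ∀ (line : List Char),
    pvLineRec max_w line 0 = PySem.Chars.join ['\n'] (pvChunks max_w.toNat line) := by
  have hw1 : 1 ≤ max_w.toNat := by omega
  have key : ∀ (n : Nat) (line : List Char), line.length ≤ n →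
      pvLineRec max_w line 0 = PySem.Chars.join ['\n'] (pvChunks max_w.toNat line) := by
    intro n
    induction n with
    | zero =>
      intro line h
      have hl : line = [] := List.eq_nil_of_length_eq_zero (by omega)
      subst hl
      simp [pvLineRec, pvChunks, PySem.Chars.join_nil]
    | succ n ih =>
      intro line h
      cases hline : line with
      | nil => simp [pvLineRec, pvChunks, PySem.Chars.join_nil]
      | cons c cs =>
        rw [← hline]
        have hne : line ≠ [] := by rw [hline]; simp
        rw [pv_lineRec_step max_w hw line max_w.toNat 0
          (by rw [Int.toNat_of_nonneg (by omega)]; ring) (by omega)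
          (by rw [Int.toNat_of_nonneg (by omega)])]
        rw [pv_chunks_cons_eq max_w.toNat hw1 line hne]
        by_cases hd : line.drop max_w.toNat = []
        · rw [if_pos hd, hd, pvChunks, PySem.Chars.join_singleton]
          simp
        · rw [if_neg hd]
          rw [ih (line.drop max_w.toNat) (by
            rw [hline] at h ⊢
            simp at h ⊢
            omega)]
          rw [pv_chunks_cons_eq max_w.toNat hw1 _ hd, PySem.Chars.join_cons_cons,
            ← pv_chunks_cons_eq max_w.toNat hw1 _ hd]
          simp
  intro line
  exact key line.length line le_rfl

theorem pv_perLine_ne (max_w : Int) (hw : 1 ≤ max_w) (line : List Char) :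
    pvPerLine max_w line ≠ [] := by
  unfold pvPerLine
  split_ifs with h
  · simp
  · have hne : line ≠ [] := by
      intro h'; rw [h'] at h; simp at h; omega
    rw [pv_chunks_cons_eq max_w.toNat (by omega) line hne]
    simp

theorem pv_perLine_join (max_w : Int) (hw : 1 ≤ max_w) (line : List Char) :
    pvLineRec max_w line 0 = PySem.Chars.join ['\n'] (pvPerLine max_w line) := by
  unfold pvPerLine
  split_ifs with h
  · cases hline : line with
    | nil => simp [pvLineRec, PySem.Chars.join_singleton]
    | cons c cs =>
      rw [PySem.Chars.join_singleton, ← hline, pv_lineRec_join max_w hw line,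
        pv_chunks_short max_w.toNat line (by rw [hline]; simp) (by omega),
        PySem.Chars.join_singleton]
  · exact pv_lineRec_join max_w hw line

theorem pv_flatMap_ne (max_w : Int) (hw : 1 ≤ max_w) (r : List Char) :
    (pvSplitNl [] r).flatMap (pvPerLine max_w) ≠ [] := by
  cases h : pvSplitNl [] r with
  | nil => exact absurd h (pv_splitNl_ne_nil r [])
  | cons p l =>
    simp only [List.flatMap_cons]
    intro h'
    exact pv_perLine_ne max_w hw p (by
      rcases List.append_eq_nil_iff.mp h' with ⟨h1, _⟩
      exact h1)

theorem pv_main (max_w : Int) (hw : 1 ≤ max_w) : ∀ (cs : List Char),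
    pvBRec max_w cs 0 = PySem.Chars.join ['\n'] ((pvSplitNl [] cs).flatMap (pvPerLine max_w)) := by
  have key : ∀ (n : Nat) (cs : List Char), cs.length ≤ n →
      pvBRec max_w cs 0 = PySem.Chars.join ['\n'] ((pvSplitNl [] cs).flatMap (pvPerLine max_w)) := by
    intro n
    induction n with
    | zero =>
      intro cs h
      have hl : cs = [] := List.eq_nil_of_length_eq_zero (by omega)
      subst hl
      simp [pvBRec, pvSplitNl, pvPerLine, if_pos (by omega : (0 : Int) < max_w),
        PySem.Chars.join_singleton]
    | succ n ih =>
      intro cs h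
      by_cases hmem : '\n' ∈ cs
      · -- split at the first newline
        have hdw : cs.dropWhile (fun c => c != '\n') ≠ [] := by
          intro h'
          rw [List.dropWhile_eq_nil_iff] at h'
          have := h' '\n' hmem
          simp at this
        obtain ⟨d, ds, hds⟩ := List.exists_cons_of_ne_nil hdw
        have hd : d = '\n' := by
          have h2 := List.head_dropWhile_not (fun c => c != '\n') hdw
          have h4 : (List.dropWhile (fun c => c != '\n') cs).head? = some d := by
            rw [hds]; rfl
          rw [List.head?_eq_some_head hdw] at h4
          rw [Option.some_inj.mp h4] at h2
          simpa using h2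
        have hsplit : cs = cs.takeWhile (fun c => c != '\n') ++ '\n' :: ds := by
          conv_lhs => rw [← List.takeWhile_append_dropWhile (p := fun c => c != '\n') (l := cs)]
          rw [hds, hd]
        have hxs : '\n' ∉ cs.takeWhile (fun c => c != '\n') := by
          intro hmem'
          have := List.mem_takeWhile_imp hmem'
          simp at this
        rw [hsplit, pv_bRec_append_nl max_w _ _ _ hxs, pv_splitNl_append _ _ _ hxs]
        simp only [List.nil_append, List.flatMap_cons]
        rw [pv_join_append ['\n'] _ _ (pv_perLine_ne max_w hw _) (pv_flatMap_ne max_w hw ds)]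
        rw [← pv_perLine_join max_w hw]
        rw [← ih ds (by
          have := congrArg List.length hsplit
          simp at this
          omega)]
        simp
      · rw [pv_splitNl_no_nl cs [] hmem]
        simp only [List.nil_append, List.flatMap_cons, List.flatMap_nil, List.append_nil]
        rw [← pv_perLine_join max_w hw, pv_bRec_no_nl max_w cs 0 hmem]
  intro cs
  exact key cs.length cs le_rfl

-- ===== VERDICT (by name: the statement is the Claim_ definition above) =====
theorem break_lines_on_max_width_spec : Claim_equal_break_lines_on_max_width := by
  intro text max_w _ hpre
  unfold Spec_break_lines_on_max_width
  simp only [break_lines_on_max_width, break_lines_on_max_width_alt]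
  rw [pv_splitOn_eq, pv_foldA_eq max_w hpre, pv_bFold_eq max_w, pv_main max_w hpre]
  simp
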